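-- pv_equiv track=rewrite | github.com/adanzl/leetcode-practice | py/q2400/Q2478.py | beautifulPartitions
-- ===== SOURCE A (Python) =====
-- def beautifulPartitions(s: str, k: int, l: int) -> int:
--     n = len(s)
--     dp = [[0] * (n + 1) for _ in range(k + 1)]
--     dp[0][0] = 1
--     is_prime = lambda c: c in "2357"
--     if k * l > n or not is_prime(s[0]) or is_prime(s[-1]):  # 剪枝
--         return 0
--     # 判断是否可以在 j-1 和 j 之间分割（开头和末尾也算）
--     can_partition = lambda j: j == 0 or j == n or not is_prime(s[j - 1]) and is_prime(s[j])
--     for i in range(1, k + 1):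
--         sum = 0
--         # 枚举的起点和终点需要给前后的子串预留出足够的长度
--         for j in range(i * l, n - (k - i) * l + 1):
--             if can_partition(j - l): sum += dp[i - 1][j - l]  # 长度至少是 minLength
--             if can_partition(j): dp[i][j] = sum
--
--     return dp[-1][-1] % (10**9 + 7)
-- ===== SOURCE B (Python) =====
-- def beautifulPartitions(s: str, k: int, l: int) -> int:
--     n = len(s)
--     if k * l > n or s[0] not in "2357" or s[-1] in "2357":
--         return 0
--     can = lambda j: j == 0 or j == n or (s[j - 1] not in "2357" and s[j] in "2357")
--     # naive layered DP: prev[j] = number of ways to cut s[:j] into i beautiful parts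
--     prev = [1 if j == 0 else 0 for j in range(n + 1)]
--     for _ in range(1, k + 1):
--         cur = [0] * (n + 1)
--         for j in range(n + 1):
--             if can(j):
--                 cur[j] = sum(prev[t] for t in range(0, j - l + 1) if can(t))
--         prev = cur
--     return prev[n] % (10**9 + 7)
-- ===== Notes on version B (the rewrite author's own statement) =====
-- stated objective: alternative
-- what changed: B replaces A's single dp table filled with an O(1) running-sum transition over a length-restricted j-window by a layered DP that rebuilds each row and recomputes every entry with an explicit rescan of all earlier cut points t <= j-l, relying on rows being zero at infeasible cut points instead of A's window bounds.
import Mathlib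
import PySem

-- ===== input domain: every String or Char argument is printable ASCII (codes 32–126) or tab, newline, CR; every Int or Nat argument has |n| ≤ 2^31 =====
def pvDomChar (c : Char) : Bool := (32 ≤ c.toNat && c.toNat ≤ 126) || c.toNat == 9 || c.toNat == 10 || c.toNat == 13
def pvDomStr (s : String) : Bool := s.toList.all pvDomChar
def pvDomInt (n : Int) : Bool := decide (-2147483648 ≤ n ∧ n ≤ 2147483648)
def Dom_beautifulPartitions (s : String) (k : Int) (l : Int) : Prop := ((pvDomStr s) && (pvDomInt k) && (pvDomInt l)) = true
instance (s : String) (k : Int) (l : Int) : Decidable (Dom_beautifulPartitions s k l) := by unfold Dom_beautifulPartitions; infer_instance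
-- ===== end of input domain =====

-- B computes the same count with a layered DP whose entries are recomputed by an explicit
-- rescan of earlier cut points, instead of A's running-sum transition (objective: alternative).

-- ===== PORT A =====
-- shared helpers mirroring A's lambdas `is_prime` and `can_partition` (B's Python has the same two)
def pvIsPrime (c : Char) : Bool := ['2', '3', '5', '7'].contains c

def pvCan (cs : List Char) (j : Int) : Bool :=
  decide (j = 0) || decide (j = (cs.length : Int)) ||
    (!(pvIsPrime (PySem.List.pyGetD cs (j - 1) ' ')) && pvIsPrime (PySem.List.pyGetD cs j ' '))

def pvGuard (cs : List Char) (k l : Int) : Bool :=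
  decide (k * l > (cs.length : Int)) || !(pvIsPrime (PySem.List.pyGetD cs 0 ' ')) ||
    pvIsPrime (PySem.List.pyGetD cs (-1) ' ')

def beautifulPartitions (s : String) (k : Int) (l : Int) : Int :=
  let cs := s.toList
  let n : Int := (cs.length : Int)
  let dp0 : Int → Int → Int := fun i j => if i = 0 ∧ j = 0 then 1 else 0
  if pvGuard cs k l then 0
  else
    let dp := (PySem.List.pyRange 1 (k + 1) 1).foldl (fun dp i =>
      ((PySem.List.pyRange (i * l) (n - (k - i) * l + 1) 1).foldl
        (fun (st : Int × (Int → Int → Int)) j =>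
          let sum := if pvCan cs (j - l) then st.1 + st.2 (i - 1) (j - l) else st.1
          (sum, if pvCan cs j then (fun i' j' => if i' = i ∧ j' = j then sum else st.2 i' j') else st.2))
        (0, dp)).2) dp0
    PySem.Int.mod (dp k n) (10 ^ 9 + 7)

-- ===== PORT B =====
def beautifulPartitions_alt (s : String) (k : Int) (l : Int) : Int :=
  let cs := s.toList
  let n : Int := (cs.length : Int)
  if pvGuard cs k l then 0
  else
    let prev := (PySem.List.pyRange 1 (k + 1) 1).foldl (fun prev _ =>
        fun j => if pvCan cs j then
            (PySem.List.pyRange 0 (j - l + 1) 1).foldl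
              (fun acc t => if pvCan cs t then acc + prev t else acc) 0
          else 0)
      (fun j => if j = 0 then 1 else 0)
    PySem.Int.mod (prev n) (10 ^ 9 + 7)

-- ===== PRECONDITION & SPEC =====
-- Pre_ excludes only inputs on which A raises: empty s (s[0]), k < 0 (dp[0][0] on an empty
-- table), and l < 0 with k ≥ 1 when the early guard does not fire (A's index arithmetic then
-- always reaches s[n - l - 1], an IndexError).
def Pre_beautifulPartitions (s : String) (k : Int) (l : Int) : Prop :=
  s.toList ≠ [] ∧ 0 ≤ k ∧ (0 ≤ l ∨ pvGuard s.toList k l = true ∨ k = 0)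
instance (s : String) (k : Int) (l : Int) : Decidable (Pre_beautifulPartitions s k l) := by
  unfold Pre_beautifulPartitions; infer_instance

def pvWitness_beautifulPartitions : String × Int × Int := ("2b", 1, 1)

def Spec_beautifulPartitions (s : String) (k : Int) (l : Int) (out : Int) : Prop := out = beautifulPartitions_alt s k l
instance (s : String) (k : Int) (l : Int) (out : Int) : Decidable (Spec_beautifulPartitions s k l out) := by unfold Spec_beautifulPartitions; infer_instance

-- ===== CLAIM (what is proved, stated in full; the proofs are below) =====
def Claim_equal_beautifulPartitions : Prop := ∀ (s : String) (k : Int) (l : Int), Dom_beautifulPartitions s k l → Pre_beautifulPartitions s k l → Spec_beautifulPartitions s k l (beautifulPartitions s k l)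

-- ===== LEMMAS AND PROOFS =====

-- proof-side abbreviations for the two folds
def pvCsum (can : Int → Bool) (f : Int → Int) (a b : Int) : Int :=
  (PySem.List.pyRange a b 1).foldl (fun acc t => if can t then acc + f t else acc) 0

def pvF (can : Int → Bool) (l : Int) : Nat → Int → Int
  | 0 => fun j => if j = 0 then 1 else 0
  | m + 1 => fun j => if can j then pvCsum can (pvF can l m) 0 (j - l + 1) else 0

def pvDpSpec (can : Int → Bool) (l n k m i j : Int) : Int :=
  if i = 0 then (if j = 0 then 1 else 0)
  else if 1 ≤ i ∧ i ≤ m ∧ i * l ≤ j ∧ j ≤ n - (k - i) * l then pvF can l i.toNat j else 0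

def pvInnerStep (can : Int → Bool) (l : Int) (i : Int)
    (st : Int × (Int → Int → Int)) (j : Int) : Int × (Int → Int → Int) :=
  let sum := if can (j - l) then st.1 + st.2 (i - 1) (j - l) else st.1
  (sum, if can j then (fun i' j' => if i' = i ∧ j' = j then sum else st.2 i' j') else st.2)

def pvStepA (can : Int → Bool) (l n k : Int) (dp : Int → Int → Int) (i : Int) : Int → Int → Int :=
  ((PySem.List.pyRange (i * l) (n - (k - i) * l + 1) 1).foldl (pvInnerStep can l i) (0, dp)).2

lemma pvFoldl_ite_add (can : Int → Bool) (f : Int → Int) (lst : List Int) (c : Int) :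
    lst.foldl (fun acc t => if can t then acc + f t else acc) c
      = c + (lst.map (fun t => if can t then f t else 0)).sum := by
  induction lst generalizing c with
  | nil => simp
  | cons x xs ih =>
      simp only [List.foldl_cons, List.map_cons, List.sum_cons, ih]
      split <;> ring

lemma pvCsum_eq (can : Int → Bool) (f : Int → Int) (a b : Int) :
    pvCsum can f a b = ((PySem.List.pyRange a b 1).map (fun t => if can t then f t else 0)).sum := by
  simpa [pvCsum] using pvFoldl_ite_add can f (PySem.List.pyRange a b 1) 0

lemma pvCsum_nil (can : Int → Bool) (f : Int → Int) {a b : Int} (h : b ≤ a) :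
    pvCsum can f a b = 0 := by
  simp [pvCsum, PySem.List.pyRange_one_eq_nil h]

lemma pvCsum_succ (can : Int → Bool) (f : Int → Int) {a b : Int} (h : a ≤ b) :
    pvCsum can f a (b + 1) = pvCsum can f a b + (if can b then f b else 0) := by
  rw [pvCsum_eq, pvCsum_eq, PySem.List.pyRange_one_succ_right h]
  simp

lemma pvCsum_split (can : Int → Bool) (f : Int → Int) {a m b : Int} (h1 : a ≤ m) (h2 : m ≤ b) :
    pvCsum can f a b = pvCsum can f a m + pvCsum can f m b := by
  rw [pvCsum_eq, pvCsum_eq, pvCsum_eq, PySem.List.pyRange_one_append a m b h1 h2]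
  simp

lemma pvCsum_zero (can : Int → Bool) (f : Int → Int) {a b : Int}
    (h : ∀ t, a ≤ t → t < b → can t = true → f t = 0) : pvCsum can f a b = 0 := by
  rw [pvCsum_eq]
  apply List.sum_eq_zero
  intro x hx
  simp only [List.mem_map] at hx
  obtain ⟨t, ht, rfl⟩ := hx
  rw [PySem.List.mem_pyRange_one] at ht
  split_ifs with hc
  · exact h t ht.1 ht.2 hc
  · rfl

lemma pvF_zero (can : Int → Bool) (l : Int) (_hl : 0 ≤ l) :
    ∀ (m : Nat) (j : Int), j < (m : Int) * l → pvF can l m j = 0 := by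
  intro m
  induction m with
  | zero => intro j hj; simp only [Nat.cast_zero, zero_mul] at hj
            simp [pvF]; omega
  | succ m ih =>
      intro j hj
      push_cast at hj
      have hml : ((m : Int) + 1) * l = (m : Int) * l + l := by ring
      simp only [pvF]
      split_ifs with hc
      · apply pvCsum_zero
        intro t ht0 htb _
        apply ih
        linarith
      · rfl

lemma pvDpSpec_prev (can : Int → Bool) (l n k i a : Int) (_hl : 0 ≤ l) (hi1 : 1 ≤ i)
    (ha1 : i * l ≤ a) (ha2 : a ≤ n - (k - i) * l) :
    pvDpSpec can l n k (i - 1) (i - 1) (a - l) = pvF can l (i - 1).toNat (a - l) := by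
  by_cases hi : i = 1
  · subst hi
    simp [pvDpSpec, pvF]
  · have e1 : (i - 1) * l = i * l - l := by ring
    have e2 : n - (k - (i - 1)) * l = n - (k - i) * l - l := by ring
    rw [pvDpSpec]
    rw [if_neg (by omega), if_pos ⟨by omega, le_rfl, by linarith, by linarith⟩]

lemma pvDpSpec_succ_ne (can : Int → Bool) (l n k m i j : Int) (hne : i ≠ m + 1) :
    pvDpSpec can l n k m i j = pvDpSpec can l n k (m + 1) i j := by
  by_cases hi : i = 0
  · simp [pvDpSpec, hi]
  · rw [pvDpSpec, pvDpSpec, if_neg hi, if_neg hi]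
    refine if_congr ?_ rfl rfl
    constructor
    · rintro ⟨h1, h2, h3⟩; exact ⟨h1, by omega, h3⟩
    · rintro ⟨h1, h2, h3⟩; exact ⟨h1, by omega, h3⟩

lemma pvDpSpec_newrow (can : Int → Bool) (l n k i j : Int) (hi1 : 1 ≤ i) :
    pvDpSpec can l n k (i - 1) i j = 0 := by
  rw [pvDpSpec, if_neg (by omega), if_neg (fun h => absurd h.2.1 (by omega))]

lemma pvInner (can : Int → Bool) (l n k i : Int) (hl : 0 ≤ l) (hi1 : 1 ≤ i) (hik : i ≤ k)
    (_hkl : k * l ≤ n) :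
    ∀ (d : Nat) (a : Int), i * l ≤ a → a ≤ n - (k - i) * l + 1 →
      (n - (k - i) * l + 1 - a).toNat = d →
      (PySem.List.pyRange a (n - (k - i) * l + 1) 1).foldl (pvInnerStep can l i)
        (pvCsum can (pvF can l (i - 1).toNat) ((i - 1) * l) (a - l),
         fun i' j' => if i' = i ∧ i * l ≤ j' ∧ j' < a then pvDpSpec can l n k i i' j'
                      else pvDpSpec can l n k (i - 1) i' j')
      = (pvCsum can (pvF can l (i - 1).toNat) ((i - 1) * l) (n - (k - i) * l + 1 - l),
         fun i' j' => if i' = i ∧ i * l ≤ j' ∧ j' < n - (k - i) * l + 1 then pvDpSpec can l n k i i' j'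
                      else pvDpSpec can l n k (i - 1) i' j') := by
  intro d
  induction d with
  | zero =>
      intro a ha1 ha2 hd
      have : a = n - (k - i) * l + 1 := by omega
      subst this
      rw [PySem.List.pyRange_one_eq_nil le_rfl]
      rfl
  | succ d ih =>
      intro a ha1 ha2 hd
      have hab : a < n - (k - i) * l + 1 := by omega
      rw [PySem.List.pyRange_one_cons hab, List.foldl_cons]
      have hll : (i - 1) * l ≤ a - l := by nlinarith
      have hprev : (if ((i - 1 : Int) = i ∧ i * l ≤ a - l ∧ a - l < a) then pvDpSpec can l n k i (i - 1) (a - l)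
                    else pvDpSpec can l n k (i - 1) (i - 1) (a - l))
                    = pvF can l (i - 1).toNat (a - l) := by
        rw [if_neg (fun h => absurd h.1 (by omega))]
        exact pvDpSpec_prev can l n k i a hl hi1 ha1 (by omega)
      have hsum : (if can (a - l) then
            pvCsum can (pvF can l (i - 1).toNat) ((i - 1) * l) (a - l) + pvF can l (i - 1).toNat (a - l)
          else pvCsum can (pvF can l (i - 1).toNat) ((i - 1) * l) (a - l))
          = pvCsum can (pvF can l (i - 1).toNat) ((i - 1) * l) (a + 1 - l) := by
        have e : a + 1 - l = (a - l) + 1 := by ring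
        rw [e, pvCsum_succ can _ hll]
        split <;> simp
      have hFa : (if can a then
            pvCsum can (pvF can l (i - 1).toNat) ((i - 1) * l) (a + 1 - l)
          else (0 : Int)) = pvF can l i.toNat a := by
        have hit : i.toNat = (i - 1).toNat + 1 := by omega
        rw [hit]
        simp only [pvF]
        split_ifs with hc
        · have h0 : (0 : Int) ≤ (i - 1) * l := by nlinarith
          have h1 : (i - 1) * l ≤ a - l + 1 := by nlinarith
          rw [pvCsum_split can _ h0 h1]
          have hz : pvCsum can (pvF can l (i - 1).toNat) 0 ((i - 1) * l) = 0 := by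
            apply pvCsum_zero
            intro t ht0 htb _
            apply pvF_zero can l hl
            have e : ((i - 1).toNat : Int) = i - 1 := by omega
            rw [e]; exact htb
          rw [hz, zero_add]
          have e : a + 1 - l = a - l + 1 := by ring
          rw [e]
        · rfl
      have hDa : pvDpSpec can l n k i i a = pvF can l i.toNat a := by
        rw [pvDpSpec, if_neg (by omega), if_pos ⟨hi1, le_rfl, ha1, by linarith⟩]
      have hstep : pvInnerStep can l i
          (pvCsum can (pvF can l (i - 1).toNat) ((i - 1) * l) (a - l),
           fun i' j' => if i' = i ∧ i * l ≤ j' ∧ j' < a then pvDpSpec can l n k i i' j'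
                        else pvDpSpec can l n k (i - 1) i' j') a
          = (pvCsum can (pvF can l (i - 1).toNat) ((i - 1) * l) (a + 1 - l),
             fun i' j' => if i' = i ∧ i * l ≤ j' ∧ j' < a + 1 then pvDpSpec can l n k i i' j'
                          else pvDpSpec can l n k (i - 1) i' j') := by
        simp only [pvInnerStep]
        rw [hprev, hsum]
        refine congrArg (Prod.mk _) ?_
        by_cases hca : can a = true
        · rw [if_pos hca]
          funext i' j'
          by_cases hii : i' = i
          · subst hii
            by_cases hja : j' = a
            · subst hja
              trans pvCsum can (pvF can l (i' - 1).toNat) ((i' - 1) * l) (j' + 1 - l)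
              · exact if_pos ⟨rfl, rfl⟩
              · rw [if_pos ⟨rfl, ha1, by omega⟩, hDa, ← hFa, if_pos hca]
            · trans (if (i' = i' ∧ i' * l ≤ j' ∧ j' < a) then pvDpSpec can l n k i' i' j'
                     else pvDpSpec can l n k (i' - 1) i' j')
              · exact if_neg (fun h => hja h.2)
              · exact if_congr ⟨fun h => ⟨h.1, h.2.1, by omega⟩,
                  fun h => ⟨h.1, h.2.1, by omega⟩⟩ rfl rfl
          · trans (if (i' = i ∧ i * l ≤ j' ∧ j' < a) then pvDpSpec can l n k i i' j'
                   else pvDpSpec can l n k (i - 1) i' j')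
            · exact if_neg (fun h => hii h.1)
            · rw [if_neg (fun h => hii h.1), if_neg (fun h => hii h.1)]
        · rw [if_neg hca]
          funext i' j'
          by_cases hii : i' = i
          · subst hii
            by_cases hja : j' = a
            · subst hja
              trans pvDpSpec can l n k (i' - 1) i' j'
              · exact if_neg (fun h => absurd h.2.2 (lt_irrefl j'))
              · rw [if_pos ⟨rfl, ha1, by omega⟩, hDa, ← hFa, if_neg hca]
                exact pvDpSpec_newrow can l n k i' j' hi1
            · exact if_congr ⟨fun h => ⟨h.1, h.2.1, by omega⟩,
                fun h => ⟨h.1, h.2.1, by omega⟩⟩ rfl rfl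
          · rw [if_neg (fun h => hii h.1), if_neg (fun h => hii h.1)]
      rw [hstep]
      exact ih (a + 1) (by omega) (by omega) (by omega)

lemma pvStepA_spec (can : Int → Bool) (l n k i0 : Int) (hl : 0 ≤ l) (h1 : 1 ≤ i0)
    (hik : i0 ≤ k) (hkl : k * l ≤ n) :
    pvStepA can l n k (fun i j => pvDpSpec can l n k (i0 - 1) i j) i0
      = fun i j => pvDpSpec can l n k i0 i j := by
  have hble : i0 * l ≤ n - (k - i0) * l + 1 := by nlinarith
  have e0 : (0 : Int) = pvCsum can (pvF can l (i0 - 1).toNat) ((i0 - 1) * l) (i0 * l - l) := by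
    rw [pvCsum_nil can _ (by nlinarith)]
  have e1 : (fun i j => pvDpSpec can l n k (i0 - 1) i j)
      = (fun i' j' => if i' = i0 ∧ i0 * l ≤ j' ∧ j' < i0 * l then pvDpSpec can l n k i0 i' j'
                      else pvDpSpec can l n k (i0 - 1) i' j') := by
    funext i' j'
    rw [if_neg (fun h => absurd h.2.2 (not_lt.mpr h.2.1))]
  rw [pvStepA, e1]
  conv_lhs => rw [show ((0 : Int), (fun i' j' => if i' = i0 ∧ i0 * l ≤ j' ∧ j' < i0 * l then pvDpSpec can l n k i0 i' j' else pvDpSpec can l n k (i0 - 1) i' j'))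
    = (pvCsum can (pvF can l (i0 - 1).toNat) ((i0 - 1) * l) (i0 * l - l),
       (fun i' j' => if i' = i0 ∧ i0 * l ≤ j' ∧ j' < i0 * l then pvDpSpec can l n k i0 i' j' else pvDpSpec can l n k (i0 - 1) i' j')) from by rw [← e0]]
  rw [pvInner can l n k i0 hl h1 hik hkl (n - (k - i0) * l + 1 - i0 * l).toNat (i0 * l) le_rfl hble rfl]
  funext ia ja
  show (if ia = i0 ∧ i0 * l ≤ ja ∧ ja < n - (k - i0) * l + 1 then pvDpSpec can l n k i0 ia ja
        else pvDpSpec can l n k (i0 - 1) ia ja) = pvDpSpec can l n k i0 ia ja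
  by_cases hii : ia = i0
  · subst hii
    by_cases hc : ia * l ≤ ja ∧ ja < n - (k - ia) * l + 1
    · rw [if_pos ⟨rfl, hc⟩]
    · rw [if_neg (fun h => hc h.2), pvDpSpec_newrow can l n k ia ja h1, pvDpSpec,
         if_neg (by omega), if_neg (fun h => hc ⟨h.2.2.1, by linarith [h.2.2.2]⟩)]
  · rw [if_neg (fun h => hii h.1)]
    have e : i0 - 1 + 1 = i0 := by ring
    have h2 := pvDpSpec_succ_ne can l n k (i0 - 1) ia ja (by rw [e]; exact hii)
    rw [e] at h2
    exact h2

lemma pvOuter (can : Int → Bool) (l n k : Int) (hl : 0 ≤ l) (hkl : k * l ≤ n) :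
    ∀ (d : Nat) (i0 : Int), 1 ≤ i0 → i0 ≤ k + 1 → (k + 1 - i0).toNat = d →
      (PySem.List.pyRange i0 (k + 1) 1).foldl (pvStepA can l n k)
          (fun i j => pvDpSpec can l n k (i0 - 1) i j)
        = fun i j => pvDpSpec can l n k k i j := by
  intro d
  induction d with
  | zero =>
      intro i0 h1 h2 hd
      have e : i0 - 1 = k := by omega
      rw [e, PySem.List.pyRange_one_eq_nil (by omega), List.foldl_nil]
  | succ d ih =>
      intro i0 h1 h2 hd
      rw [PySem.List.pyRange_one_cons (by omega), List.foldl_cons,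
         pvStepA_spec can l n k i0 hl h1 (by omega) hkl]
      have := ih (i0 + 1) (by omega) (by omega) (by omega)
      have e : i0 + 1 - 1 = i0 := by ring
      rw [e] at this
      exact this

lemma pvBfold (can : Int → Bool) (l k : Int) :
    ∀ (d : Nat) (i0 : Int) (m : Nat), i0 ≤ k + 1 → (k + 1 - i0).toNat = d →
      (PySem.List.pyRange i0 (k + 1) 1).foldl
          (fun prev _ => fun j => if can j then pvCsum can prev 0 (j - l + 1) else 0)
          (pvF can l m)
        = pvF can l (m + d) := by
  intro d
  induction d with
  | zero =>
      intro i0 m h2 hd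
      rw [PySem.List.pyRange_one_eq_nil (by omega), List.foldl_nil, Nat.add_zero]
  | succ d ih =>
      intro i0 m h2 hd
      rw [PySem.List.pyRange_one_cons (by omega), List.foldl_cons]
      have e : (fun j => if can j then pvCsum can (pvF can l m) 0 (j - l + 1) else 0)
          = pvF can l (m + 1) := by
        funext j; simp [pvF]
      rw [e]
      have := ih (i0 + 1) (m + 1) (by omega) (by omega)
      rw [this]
      congr 1
      omega

lemma pvDpSpec_final (can : Int → Bool) (l n k : Int) (hk : 0 ≤ k) (hkl : k * l ≤ n) :
    pvDpSpec can l n k k k n = pvF can l k.toNat n := by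
  by_cases hk0 : k = 0
  · subst hk0; simp [pvDpSpec, pvF]
  · have e : (k - k) * l = 0 := by ring
    rw [pvDpSpec, if_neg (by omega), if_pos ⟨by omega, le_rfl, hkl, by linarith⟩]

theorem beautifulPartitions_spec : Claim_equal_beautifulPartitions := by
  intro s k l _ hPre
  obtain ⟨hne, hk, hcase⟩ := hPre
  unfold Spec_beautifulPartitions
  by_cases hg : pvGuard s.toList k l = true
  · simp only [beautifulPartitions, beautifulPartitions_alt, hg, if_true]
  · have hgf : pvGuard s.toList k l = false := by
      revert hg; cases pvGuard s.toList k l <;> simp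
    have hn1 : 1 ≤ (s.toList.length : Int) := by
      have : 0 < s.toList.length := List.length_pos_iff.mpr hne
      exact_mod_cast this
    have hkl : k * l ≤ (s.toList.length : Int) := by
      unfold pvGuard at hgf
      simp only [Bool.or_eq_false_iff, Bool.not_eq_false', decide_eq_false_iff_not,
        not_lt] at hgf
      exact hgf.1.1
    have hA : beautifulPartitions s k l
        = PySem.Int.mod (((PySem.List.pyRange 1 (k + 1) 1).foldl
            (pvStepA (pvCan s.toList) l ((s.toList.length : Int)) k)
            (fun i j => if i = 0 ∧ j = 0 then 1 else 0)) k ((s.toList.length : Int)))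
            (10 ^ 9 + 7) := by
      simp only [beautifulPartitions, hgf, Bool.false_eq_true, if_false]
      rfl
    have hB : beautifulPartitions_alt s k l
        = PySem.Int.mod (((PySem.List.pyRange 1 (k + 1) 1).foldl
            (fun prev (_ : Int) => fun j => if pvCan s.toList j then pvCsum (pvCan s.toList) prev 0 (j - l + 1) else 0)
            (fun j => if j = 0 then 1 else 0)) ((s.toList.length : Int)))
            (10 ^ 9 + 7) := by
      simp only [beautifulPartitions_alt, hgf, Bool.false_eq_true, if_false, pvCsum]
    rcases hcase with hl | hgt | hk0
    · -- main case: 0 ≤ l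
      rw [hA, hB]
      have hdp0 : (fun i j => if i = 0 ∧ j = 0 then (1 : Int) else 0)
          = fun i j => pvDpSpec (pvCan s.toList) l ((s.toList.length : Int)) k (1 - 1) i j := by
        funext i j
        by_cases hi : i = 0
        · simp [pvDpSpec, hi]
        · rw [if_neg (by tauto), pvDpSpec, if_neg hi, if_neg (fun h => absurd h.2.1 (by omega))]
      have hp0 : (fun j => if j = 0 then (1 : Int) else 0) = pvF (pvCan s.toList) l 0 := by
        funext j; simp [pvF]
      rw [hdp0, pvOuter (pvCan s.toList) l ((s.toList.length : Int)) k hl hkl k.toNat 1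
          (by omega) (by omega) (by omega),
        hp0, pvBfold (pvCan s.toList) l k k.toNat 1 0 (by omega) (by omega)]
      simp only [Nat.zero_add]
      rw [pvDpSpec_final (pvCan s.toList) l ((s.toList.length : Int)) k hk hkl]
    · exact absurd hgt (by simp [hgf])
    · -- k = 0: both folds are empty
      subst hk0
      rw [hA, hB, PySem.List.pyRange_one_eq_nil (by omega), List.foldl_nil, List.foldl_nil]
      simp only []
      rw [if_neg (fun h => absurd h.2 (by omega)), if_neg (by omega)]
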